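-- pv_equiv track=rewrite | github.com/avery-b/SURF_FutureBay | Equity.py | getUnitFloors
-- ===== SOURCE A (Python) =====
-- def getUnitFloors(nUnits, nFloors):
-- 	"""
-- 	Assigns the floor number to each housing unit in a given building from bottom floor upwards.
--
-- 	kwargs:
-- 	- nUnits: The integer number of housing units in a given building
-- 	- nFloors: The integer number of floors in a given building
--
-- 	returns:
-- 	- floorList: A list which contains the floor assignment of the housing units
--
-- 	"""
-- 	if nUnits == 1: return [1]
-- 	else:
-- 		# Create a list of floors to iterate over and assign to units
-- 		buildingFloors = [i for i in range(1,nFloors+1)]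
-- 		while nUnits > len(buildingFloors):
-- 			buildingFloors.extend(buildingFloors)
-- 		iteration = 1
-- 		floorIndex = 0
-- 		floorList = []
-- 		# Iterate through units and assign floor value
-- 		while iteration <= nUnits:
-- 			floor = buildingFloors[floorIndex]
-- 			floorList.append(floor)
-- 			iteration += 1
-- 			floorIndex += 1
-- 	return floorList
-- ===== SOURCE B (Python) =====
-- def getUnitFloors(nUnits, nFloors):
-- 	"""Assigns cyclic floor numbers 1..nFloors to nUnits units, by closed-form modular arithmetic."""
-- 	if nUnits == 1: return [1]
-- 	return [(i % nFloors) + 1 for i in range(nUnits)]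
-- ===== Notes on version B (the rewrite author's own statement) =====
-- stated objective: simpler
-- what changed: Replaces A's repeatedly-doubled floor table plus a separate index-walking while loop with a direct closed-form (i % nFloors) + 1 per unit.
import Mathlib
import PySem

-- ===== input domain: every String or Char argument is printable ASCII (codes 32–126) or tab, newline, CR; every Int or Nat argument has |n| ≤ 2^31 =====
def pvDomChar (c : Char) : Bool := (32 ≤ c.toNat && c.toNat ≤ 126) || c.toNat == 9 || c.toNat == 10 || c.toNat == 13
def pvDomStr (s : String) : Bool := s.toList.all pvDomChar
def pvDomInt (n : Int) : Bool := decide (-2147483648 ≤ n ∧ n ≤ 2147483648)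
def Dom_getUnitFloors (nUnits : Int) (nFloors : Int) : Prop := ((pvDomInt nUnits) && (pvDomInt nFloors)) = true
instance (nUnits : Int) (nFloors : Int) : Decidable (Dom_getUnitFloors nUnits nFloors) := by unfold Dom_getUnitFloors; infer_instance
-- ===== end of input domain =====

-- B replaces A's doubled floor table and index-walking loop by the closed form (i % nFloors) + 1 per unit (objective: simpler).

-- ===== PORT A =====
-- 'while nUnits > len(buildingFloors): buildingFloors.extend(buildingFloors)'.
-- Fuel = nUnits.toNat: each doubling of a nonempty list adds at least one element, so inside
-- Pre_ the fuel never runs out; when the list is empty (nFloors ≤ 0, outside Pre_) Python diverges.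
def pvExtendLoop (nUnits : Int) : List Int → Nat → List Int
  | bf, 0 => bf
  | bf, fuel+1 => if nUnits > (bf.length : Int) then pvExtendLoop nUnits (bf ++ bf) fuel else bf

-- 'while iteration <= nUnits: floorList.append(buildingFloors[floorIndex]); …' — runs nUnits times.
-- pyGetD's default 0 is never hit inside Pre_ (the index stays below the extended table's length).
def pvAssignLoop (bf : List Int) : Nat → Nat → List Int
  | 0, _ => []
  | n+1, idx => PySem.List.pyGetD bf (idx : Int) 0 :: pvAssignLoop bf n (idx + 1)

def getUnitFloors (nUnits : Int) (nFloors : Int) : List Int :=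
  if nUnits = 1 then [1]
  else
    pvAssignLoop (pvExtendLoop nUnits (PySem.List.pyRange 1 (nFloors + 1) 1) nUnits.toNat)
      nUnits.toNat 0

-- ===== PORT B =====
def getUnitFloors_alt (nUnits : Int) (nFloors : Int) : List Int :=
  if nUnits = 1 then [1]
  else (PySem.List.pyRange 0 nUnits 1).map (fun i => PySem.Int.mod i nFloors + 1)

-- ===== PRECONDITION & SPEC =====
-- Pre_ excludes only nUnits ≥ 2 with nFloors ≤ 0, where Python A loops forever (the doubling of an
-- empty floor list never terminates); A returns on every input Pre_ admits.
def Pre_getUnitFloors (nUnits : Int) (nFloors : Int) : Prop := nUnits ≤ 1 ∨ 1 ≤ nFloors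
instance (nUnits : Int) (nFloors : Int) : Decidable (Pre_getUnitFloors nUnits nFloors) := by
  unfold Pre_getUnitFloors; infer_instance

def pvWitness_getUnitFloors : Int × Int := (7, 3)

def Spec_getUnitFloors (nUnits : Int) (nFloors : Int) (out : List Int) : Prop := out = getUnitFloors_alt nUnits nFloors
instance (nUnits : Int) (nFloors : Int) (out : List Int) : Decidable (Spec_getUnitFloors nUnits nFloors out) := by unfold Spec_getUnitFloors; infer_instance

-- ===== CLAIM (what is proved, stated in full; the proofs are below) =====
def Claim_equal_getUnitFloors : Prop := ∀ (nUnits : Int) (nFloors : Int), Dom_getUnitFloors nUnits nFloors → Pre_getUnitFloors nUnits nFloors → Spec_getUnitFloors nUnits nFloors (getUnitFloors nUnits nFloors)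

-- ===== LEMMAS AND PROOFS =====

-- The cyclic pattern the table realises.
def pvPat (nFloors : Int) (k : Nat) : Int := (k : Int) % nFloors + 1

-- Invariant of the doubling loop: the table is the pattern over range m, m a positive multiple of nFloors.
def pvInv (nFloors : Int) (l : List Int) : Prop :=
  ∃ m : Nat, nFloors ∣ (m : Int) ∧ 0 < m ∧ l = (List.range m).map (pvPat nFloors)

lemma pvPat_add_period (nFloors : Int) (m k : Nat) (hdvd : nFloors ∣ (m : Int)) :
    pvPat nFloors (k + m) = pvPat nFloors k := by
  unfold pvPat
  have : ((k + m : Nat) : Int) % nFloors = (k : Int) % nFloors := by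
    obtain ⟨c, hc⟩ := hdvd
    push_cast
    rw [hc, Int.add_mul_emod_self_left]
  rw [this]

lemma pvInv_double (nFloors : Int) (l : List Int) (h : pvInv nFloors l) :
    pvInv nFloors (l ++ l) := by
  obtain ⟨m, hdvd, hm, rfl⟩ := h
  refine ⟨m + m, by push_cast; exact dvd_add hdvd hdvd, by omega, ?_⟩
  rw [List.range_add, List.map_append, List.map_map]
  congr 1
  apply List.map_congr_left
  intro k hk
  simp only [Function.comp]
  rw [Nat.add_comm m k]
  exact (pvPat_add_period nFloors m k hdvd).symm

lemma pvExtendLoop_inv (nUnits nFloors : Int) (fuel : Nat) (l : List Int)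
    (h : pvInv nFloors l) : pvInv nFloors (pvExtendLoop nUnits l fuel) := by
  induction fuel generalizing l with
  | zero => exact h
  | succ n ih =>
    unfold pvExtendLoop
    split
    · exact ih _ (pvInv_double nFloors l h)
    · exact h

lemma pvExtendLoop_length (nUnits : Int) (fuel : Nat) (l : List Int)
    (hne : 0 < l.length) (hfuel : nUnits ≤ (l.length : Int) + fuel) :
    nUnits ≤ ((pvExtendLoop nUnits l fuel).length : Int) := by
  induction fuel generalizing l with
  | zero => simpa using hfuel
  | succ n ih =>
    unfold pvExtendLoop
    split
    · apply ih
      · simpa using hne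
      · simp only [List.length_append]
        push_cast
        omega
    · omega

-- The initial table [1..nFloors] is the pattern over range nFloors.
lemma pvInit_table (nFloors : Int) (hF : 1 ≤ nFloors) :
    PySem.List.pyRange 1 (nFloors + 1) 1 = (List.range nFloors.toNat).map (pvPat nFloors) := by
  rw [PySem.List.pyRange_one]
  have : (nFloors + 1 - 1).toNat = nFloors.toNat := by omega
  rw [this]
  apply List.map_congr_left
  intro k hk
  simp only [List.mem_range] at hk
  unfold pvPat
  have hk' : (k : Int) < nFloors := by omega
  rw [Int.emod_eq_of_lt (by positivity) hk']
  omega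

-- The assignment loop reads the pattern table in order.
lemma pvAssignLoop_pat (nFloors : Int) (m : Nat) (n idx : Nat) (h : idx + n ≤ m) :
    pvAssignLoop ((List.range m).map (pvPat nFloors)) n idx
      = (List.range n).map (fun j => pvPat nFloors (idx + j)) := by
  induction n generalizing idx with
  | zero => simp [pvAssignLoop]
  | succ n ih =>
    unfold pvAssignLoop
    rw [ih (idx + 1) (by omega)]
    have hget : PySem.List.pyGetD ((List.range m).map (pvPat nFloors)) (idx : Int) 0
        = pvPat nFloors idx := by
      rw [PySem.List.pyGetD_natCast]
      rw [List.getD_eq_getElem?_getD]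
      simp [Nat.lt_of_lt_of_le (by omega : idx < idx + (n + 1)) h]
    rw [hget, List.range_succ_eq_map, List.map_cons, List.map_map]
    refine congrArg₂ List.cons (by simp) ?_
    apply List.map_congr_left
    intro a _
    simp only [Function.comp_apply]
    congr 1
    omega

-- ===== VERDICT (by name: the statement is the Claim_ definition above) =====
theorem getUnitFloors_spec : Claim_equal_getUnitFloors := by
  intro nUnits nFloors _ hpre
  unfold Spec_getUnitFloors getUnitFloors getUnitFloors_alt
  by_cases h1 : nUnits = 1
  · simp [h1]
  · simp only [if_neg h1]
    by_cases hu : nUnits ≤ 0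
    · have htn : nUnits.toNat = 0 := by omega
      rw [htn, PySem.List.pyRange_one_eq_nil (by omega : nUnits ≤ 0)]
      simp [pvAssignLoop]
    · -- nUnits ≥ 2, so Pre_ gives 1 ≤ nFloors
      have hu2 : 2 ≤ nUnits := by omega
      have hF : 1 ≤ nFloors := by
        rcases hpre with h | h
        · omega
        · exact h
      have hinit : pvInv nFloors (PySem.List.pyRange 1 (nFloors + 1) 1) :=
        ⟨nFloors.toNat, by simp [Int.toNat_of_nonneg (by omega : (0:Int) ≤ nFloors)],
         by omega, pvInit_table nFloors hF⟩
      have hinv := pvExtendLoop_inv nUnits nFloors nUnits.toNat _ hinit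
      obtain ⟨m, hdvd, hm, heq⟩ := hinv
      have hlen0 : 0 < (PySem.List.pyRange 1 (nFloors + 1) 1).length := by
        rw [PySem.List.length_pyRange_one]; omega
      have hlen : nUnits ≤ ((pvExtendLoop nUnits (PySem.List.pyRange 1 (nFloors + 1) 1) nUnits.toNat).length : Int) := by
        apply pvExtendLoop_length
        · exact hlen0
        · rw [PySem.List.length_pyRange_one]; omega
      rw [heq] at hlen ⊢
      have hmlen : nUnits.toNat ≤ m := by
        rw [List.length_map, List.length_range] at hlen; omega
      rw [pvAssignLoop_pat nFloors m nUnits.toNat 0 (by omega)]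
      rw [PySem.List.pyRange_one]
      simp only [Int.sub_zero, List.map_map]
      apply List.map_congr_left
      intro k hk
      simp only [Function.comp, zero_add]
      unfold pvPat
      rw [PySem.Int.mod_eq_emod_of_pos (by omega)]
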